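-- pv_equiv track=rewrite | github.com/jctanner/tksoblooku | soblooku_lib.py | columns_from_tiles
-- ===== SOURCE A (Python) =====
-- import math
--
-- def column_from_tile(tile, colnum):
--     '''Get a column within a single tile'''
--     tilesq = int(math.sqrt(len(tile)))
--     column = []
--     for idx in [x for x in range(0, len(tile), tilesq)]:
--         idx = idx + colnum
--         column.append(tile[idx])
--     return column
--
-- def columns_from_tiles(tiles):
--     tilecount = len(tiles)
--     tilesq = int(math.sqrt(tilecount))
--
--     columns = []
--     for x in range(0, tilecount):
--         columns.append([])
--
--     column_index = 0
--     for tile_start in [x for x in range(0,tilesq)]: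
--         for column_number in [x for x in range(0,tilesq)]:
--             for tile_offset in [x for x in range(0,tilecount,tilesq)]:
--                 col = column_from_tile(tiles[tile_start+tile_offset], column_number)
--                 columns[column_index].extend(col)
--             column_index += 1
--
--     # cleanup
--     for idx,x in enumerate(columns):
--         for idy,y in enumerate(x):
--             if not isinstance(y, int):
--                 if y.isdigit():
--                     columns[idx][idy] = int(y)
--
--     return columns
-- ===== SOURCE B (Python) =====
-- import math
--
-- def columns_from_tiles(tiles):
--     n = len(tiles)
--     k = int(math.sqrt(n))
--     cols = [[] for _ in range(n)]
--     for row in range(k):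
--         band = tiles[row::k]
--         for c in range(k):
--             cols[row * k + c] = [
--                 tile[i + c]
--                 for tile in band
--                 for i in range(0, len(tile), int(math.sqrt(len(tile))))
--             ]
--     return cols
-- ===== Notes on version B (the rewrite author's own statement) =====
-- stated objective: simpler
-- what changed: B computes each output column directly by position (cols[row*k+c] = one comprehension over the tile band sliced out with tiles[row::k]), replacing A's running column_index counter, the column_from_tile helper with its index-stepping offset loop, the repeated extend calls, and the separate isdigit cleanup pass (a no-op on int tiles).
import Mathlib
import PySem

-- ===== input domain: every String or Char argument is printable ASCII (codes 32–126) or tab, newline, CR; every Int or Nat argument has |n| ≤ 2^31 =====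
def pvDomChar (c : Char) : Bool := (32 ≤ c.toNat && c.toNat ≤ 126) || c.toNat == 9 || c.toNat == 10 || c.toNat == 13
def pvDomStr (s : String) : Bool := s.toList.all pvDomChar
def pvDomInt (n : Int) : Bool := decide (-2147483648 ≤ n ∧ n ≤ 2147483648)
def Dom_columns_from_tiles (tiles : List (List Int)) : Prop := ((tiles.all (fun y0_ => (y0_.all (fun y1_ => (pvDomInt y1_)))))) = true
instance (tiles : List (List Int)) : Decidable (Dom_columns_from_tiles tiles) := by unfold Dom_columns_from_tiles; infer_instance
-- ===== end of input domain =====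

-- B builds each output column directly (band slice + one comprehension, no counter, no helper,
-- no cleanup pass); objective: simpler, same asymptotic cost.

-- int(math.sqrt(n)) — the integer square root (exact for any list length that fits in memory).
-- Written as a structural fold so that `decide` can evaluate it (pvISqrt is not kernel-reducible);
-- pvISqrt_eq_sqrt below proves it equal to pvISqrt.
def pvISqrt (n : Nat) : Nat :=
  (List.range (n + 1)).foldl (fun acc k => if k * k ≤ n then k else acc) 0

-- ===== PORT A =====
-- Helper 'column_from_tile'.  int(math.sqrt(len(tile))) is pvISqrt (exact for any list length);
-- tile[idx] is PySem.List.pyGetD (always in range on Pre_; on an empty tile Python raises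
-- ValueError at range(0, 0, 0), excluded by Pre_, where pyRange returns []).
def column_from_tile (tile : List Int) (colnum : Int) : List Int :=
  let tilesq : Nat := pvISqrt tile.length
  (PySem.List.pyRange 0 tile.length tilesq).foldl
    (fun column idx => column ++ [PySem.List.pyGetD tile (idx + colnum) 0]) []

def columns_from_tiles (tiles : List (List Int)) : List (List Int) :=
  let tilecount := tiles.length
  let tilesq : Nat := pvISqrt tilecount
  let columns : List (List Int) := (List.range tilecount).foldl (fun cs _ => cs ++ [[]]) []
  let st :=
    (PySem.List.pyRange 0 tilesq 1).foldl (fun st tile_start =>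
      (PySem.List.pyRange 0 tilesq 1).foldl (fun st column_number =>
        ((PySem.List.pyRange 0 tilecount tilesq).foldl (fun cols tile_offset =>
            cols.set st.2 (cols.getD st.2 [] ++
              column_from_tile (PySem.List.pyGetD tiles (tile_start + tile_offset) []) column_number))
          st.1,
         st.2 + 1)) st) (columns, (0 : Nat))
  -- cleanup loop: every element of a List Int satisfies `isinstance(y, int)`, so it changes nothing
  st.1

-- ===== PORT B =====
def columns_from_tiles_alt (tiles : List (List Int)) : List (List Int) :=
  let n := tiles.length
  let k : Nat := pvISqrt n
  let cols : List (List Int) := List.replicate n []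
  (List.range k).foldl (fun cols (row : Nat) =>
    let band := (PySem.List.slice? tiles (some (row : Int)) none (k : Int)).getD []
    (List.range k).foldl (fun cols (c : Nat) =>
      cols.set (row * k + c)
        (band.flatMap (fun tile =>
          (PySem.List.pyRange 0 tile.length (pvISqrt tile.length)).map
            (fun i => PySem.List.pyGetD tile (i + (c : Int)) 0)))) cols) cols

-- ===== PRECONDITION & SPEC =====
-- Pre_ is exactly the set of inputs on which the Python A returns: A raises IndexError when
-- pvISqrt (len tiles) does not divide len tiles, ValueError on an empty tile (range(0,0,0)),
-- and IndexError when a tile is too short for the last in-tile column to exist.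
def Pre_columns_from_tiles (tiles : List (List Int)) : Prop :=
  tiles = [] ∨
  (tiles.length % pvISqrt tiles.length = 0 ∧
   ∀ t ∈ tiles, 0 < t.length ∧
     pvISqrt t.length * ((t.length - 1) / pvISqrt t.length) + pvISqrt tiles.length ≤ t.length)
instance (tiles : List (List Int)) : Decidable (Pre_columns_from_tiles tiles) := by
  unfold Pre_columns_from_tiles; infer_instance

def pvWitness_columns_from_tiles : List (List Int) :=
  [[1, 2, 3, 4], [5, 6, 7, 8], [9, 10, 11, 12], [13, 14, 15, 16]]

def Spec_columns_from_tiles (tiles : List (List Int)) (out : List (List Int)) : Prop := out = columns_from_tiles_alt tiles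
instance (tiles : List (List Int)) (out : List (List Int)) : Decidable (Spec_columns_from_tiles tiles out) := by unfold Spec_columns_from_tiles; infer_instance

-- ===== CLAIM (what is proved, stated in full; the proofs are below) =====
def Claim_equal_columns_from_tiles : Prop := ∀ (tiles : List (List Int)), Dom_columns_from_tiles tiles → Pre_columns_from_tiles tiles → Spec_columns_from_tiles tiles (columns_from_tiles tiles)

-- ===== LEMMAS AND PROOFS =====

lemma pvISqrt_fold (n m : Nat) :
    (List.range (m + 1)).foldl (fun acc k => if k * k ≤ n then k else acc) 0
      = min m (Nat.sqrt n) := by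
  induction m with
  | zero => simp
  | succ m ih =>
    rw [List.range_succ, List.foldl_append, ih]
    simp only [List.foldl_cons, List.foldl_nil]
    split_ifs with h
    · have := Nat.le_sqrt.mpr h
      omega
    · have : ¬ (m + 1 ≤ Nat.sqrt n) := fun hc => h (Nat.le_sqrt.mp hc)
      omega

lemma pvISqrt_eq_sqrt (n : Nat) : pvISqrt n = Nat.sqrt n := by
  rw [pvISqrt, pvISqrt_fold]
  exact Nat.min_eq_right (Nat.sqrt_le_self n)

-- The value B stores in output slot row*k + c, written with A's vocabulary (indexed reads).
def pvColVal (tiles : List (List Int)) (row c : Nat) : List Int :=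
  (PySem.List.pyRange 0 tiles.length (Nat.sqrt tiles.length)).flatMap (fun off =>
    (PySem.List.pyRange 0 (PySem.List.pyGetD tiles ((row : Int) + off) []).length
        (Nat.sqrt (PySem.List.pyGetD tiles ((row : Int) + off) []).length)).map
      (fun i => PySem.List.pyGetD (PySem.List.pyGetD tiles ((row : Int) + off) []) (i + (c : Int)) 0))

-- Common normal form both ports are reduced to.
def pvBuild (tiles : List (List Int)) : List (List Int) :=
  (List.range (Nat.sqrt tiles.length)).foldl (fun cs row =>
    (List.range (Nat.sqrt tiles.length)).foldl
      (fun cs2 c => cs2.set (row * Nat.sqrt tiles.length + c) (pvColVal tiles row c)) cs)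
    (List.replicate tiles.length [])

lemma pv_set_getD_self (l : List (List Int)) (j : Nat) : l.set j (l.getD j []) = l := by
  by_cases h : j < l.length
  · rw [List.getD_eq_getElem l [] h]; exact List.set_getElem_self h
  · exact List.set_eq_of_length_le (Nat.le_of_not_lt h)

lemma pv_getD_set_self (l : List (List Int)) (j : Nat) (a : List Int) (h : j < l.length) :
    (l.set j a).getD j [] = a := by
  rw [List.getD_eq_getElem?_getD, List.getElem?_set_self h]; rfl

lemma pv_getD_replicate (n i : Nat) : (List.replicate n ([] : List Int)).getD i [] = [] := by
  rw [List.getD_eq_getElem?_getD, List.getElem?_replicate]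
  split <;> rfl

-- repeated 'columns[j].extend(col)' over a loop is one extend by the concatenation
lemma pv_foldl_set_extend {β : Type} (L : List β) (f : β → List Int) (j : Nat)
    (cols : List (List Int)) :
    L.foldl (fun cs x => cs.set j (cs.getD j [] ++ f x)) cols
      = cols.set j (cols.getD j [] ++ L.flatMap f) := by
  induction L generalizing cols with
  | nil =>
    simp only [List.foldl_nil, List.flatMap_nil, List.append_nil]
    exact (pv_set_getD_self cols j).symm
  | cons x L ih =>
    simp only [List.foldl_cons, List.flatMap_cons]
    rw [ih]
    by_cases h : j < cols.length
    · rw [pv_getD_set_self _ _ _ h, List.set_set, List.append_assoc]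
    · rw [List.set_eq_of_length_le (Nat.le_of_not_lt h),
        List.set_eq_of_length_le (Nat.le_of_not_lt h),
        List.set_eq_of_length_le (Nat.le_of_not_lt h)]

-- the in-row counter loop, counter made explicit
lemma pv_inner_pair (V : Nat → List Int) (k' : Nat) (p : List (List Int) × Nat) :
    (List.range k').foldl
        (fun st c => (st.1.set st.2 (st.1.getD st.2 [] ++ V c), st.2 + 1)) p
      = ((List.range k').foldl
          (fun cs c => cs.set (p.2 + c) (cs.getD (p.2 + c) [] ++ V c)) p.1, p.2 + k') := by
  induction k' with
  | zero => simp
  | succ k' ih =>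
    simp only [List.range_succ, List.foldl_append, List.foldl_cons, List.foldl_nil]
    rw [ih]
    simp only [Prod.mk.injEq]
    exact ⟨trivial, by omega⟩

-- extending a still-empty slot is just writing it, and slots beyond the block stay empty
lemma pv_fold_set_block (V : Nat → List Int) (k' : Nat) :
    ∀ (j : Nat) (cols : List (List Int)), (∀ i, j ≤ i → cols.getD i [] = []) →
      ((List.range k').foldl (fun cs c => cs.set (j + c) (cs.getD (j + c) [] ++ V c)) cols
          = (List.range k').foldl (fun cs c => cs.set (j + c) (V c)) cols)
      ∧ (∀ i, j + k' ≤ i →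
          ((List.range k').foldl (fun cs c => cs.set (j + c) (V c)) cols).getD i [] = []) := by
  induction k' with
  | zero =>
    intro j cols h
    exact ⟨rfl, fun i hi => h i (by omega)⟩
  | succ k' ih =>
    intro j cols h
    obtain ⟨h1, h2⟩ := ih j cols h
    constructor
    · simp only [List.range_succ, List.foldl_append, List.foldl_cons, List.foldl_nil]
      rw [h1, h2 (j + k') (le_refl _)]
      rfl
    · intro i hi
      simp only [List.range_succ, List.foldl_append, List.foldl_cons, List.foldl_nil]
      rw [List.getD_eq_getElem?_getD, List.getElem?_set_ne (by omega : j + k' ≠ i),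
        ← List.getD_eq_getElem?_getD]
      exact h2 i (by omega)

-- the whole double loop with a running counter equals the counter-free double loop
lemma pv_outer_fold (V : Nat → Nat → List Int) (k : Nat) :
    ∀ (r j : Nat) (cols : List (List Int)), (∀ i, j ≤ i → cols.getD i [] = []) →
      ((List.range r).foldl
          (fun st row =>
            ((List.range k).foldl
                (fun cs c => cs.set (st.2 + c) (cs.getD (st.2 + c) [] ++ V row c)) st.1,
             st.2 + k)) (cols, j)
        = ((List.range r).foldl
            (fun cs row =>
              (List.range k).foldl (fun cs2 c => cs2.set (j + row * k + c) (V row c)) cs) cols,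
           j + r * k))
      ∧ (∀ i, j + r * k ≤ i →
          ((List.range r).foldl
            (fun cs row =>
              (List.range k).foldl (fun cs2 c => cs2.set (j + row * k + c) (V row c)) cs) cols).getD
            i [] = []) := by
  intro r
  induction r with
  | zero =>
    intro j cols h
    exact ⟨by simp, fun i hi => h i (by omega)⟩
  | succ r ih =>
    intro j cols h
    obtain ⟨h1, h2⟩ := ih j cols h
    have hblock := pv_fold_set_block (fun c => V r c) k (j + r * k) _ h2
    constructor
    · simp only [List.range_succ, List.foldl_append, List.foldl_cons, List.foldl_nil]
      rw [h1]
      simp only [Prod.mk.injEq]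
      refine ⟨hblock.1, by ring⟩
    · intro i hi
      simp only [List.range_succ, List.foldl_append, List.foldl_cons, List.foldl_nil]
      have hk : (r + 1) * k = r * k + k := by ring
      exact hblock.2 i (by omega)

-- A's helper is a map over the in-tile row starts
lemma pv_column_eq (tile : List Int) (colnum : Int) :
    column_from_tile tile colnum
      = (PySem.List.pyRange 0 tile.length (Nat.sqrt tile.length)).map
          (fun i => PySem.List.pyGetD tile (i + colnum) 0) := by
  simp only [column_from_tile, pvISqrt_eq_sqrt]
  rw [PySem.List.foldl_append_singleton_eq_map, List.nil_append]

-- B's slice tiles[row::k] is A's stepped index read, when k divides len(tiles)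
lemma pv_band_eq (tiles : List (List Int)) (row : Nat)
    (hn : 0 < tiles.length) (hrow : row < Nat.sqrt tiles.length)
    (hmod : tiles.length % Nat.sqrt tiles.length = 0) :
    (PySem.List.slice? tiles (some (row : Int)) none (Nat.sqrt tiles.length : Int)).getD []
      = (PySem.List.pyRange 0 tiles.length (Nat.sqrt tiles.length)).map
          (fun off => PySem.List.pyGetD tiles ((row : Int) + off) []) := by
  have hk : 0 < Nat.sqrt tiles.length := Nat.sqrt_pos.mpr hn
  set n := tiles.length with hn'
  set k := Nat.sqrt n with hk'
  have hkn : k ≤ n := Nat.sqrt_le_self n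
  obtain ⟨q, hq⟩ := Nat.dvd_of_mod_eq_zero hmod
  simp only [PySem.List.slice?, PySem.List.sliceIndices, PySem.List.pyRange]
  rw [if_neg (by exact_mod_cast hk.ne' : ¬((k:Int) = 0)),
      if_neg (by exact_mod_cast hk.ne' : ¬((k:Int) = 0))]
  have h1 : ¬((k:Int) < 0) := by omega
  have h2 : ¬((row:Int) < 0) := by omega
  have h3 : (0:Int) < k := by exact_mod_cast hk
  simp only [if_neg h1, if_pos h3]
  have hrn : (row:Int) < (n:Int) := by exact_mod_cast lt_of_lt_of_le hrow hkn
  have hmin : min ((row:Int)) ((n:Int)) = (row:Int) := min_eq_left (by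
    have := lt_of_lt_of_le hrow hkn; omega)
  simp only [← hn', if_neg h2]
  rw [hmin]
  rw [if_pos hrn, if_pos (show (0:Int) < (n:Int) by omega)]
  have hq' : n = q * k := by rw [hq, Nat.mul_comm]
  have count_eq : ∀ r : Nat, r < k → (((n:Int) - (r:Int) + (k:Int) - 1) / (k:Int)).toNat = q := by
    intro r hr
    have hrn' : r ≤ n := le_trans (le_of_lt hr) hkn
    have cast1 : ((n:Int) - (r:Int) + (k:Int) - 1) = ((n - r + k - 1 : Nat) : Int) := by omega
    rw [cast1, Int.ofNat_ediv_ofNat, Int.toNat_natCast]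
    have split : n - r + k - 1 = (k - 1 - r) + q * k := by omega
    rw [split, Nat.add_mul_div_right _ _ hk, Nat.div_eq_of_lt (by omega), Nat.zero_add]
  have e1 := count_eq row hrow
  have e2 : (((n:Int) - 0 + (k:Int) - 1) / (k:Int)).toNat = q := by
    have := count_eq 0 hk
    simpa using this
  rw [e1, e2]
  rw [List.map_map]
  refine List.filterMap_eq_map_iff_forall_eq_some.mpr ?_
  intro j hj
  have hjq : j < q := List.mem_range.mp hj
  have h4 : k * (j + 1) ≤ k * q := Nat.mul_le_mul_left k hjq
  have h5 : k * (j + 1) = k * j + k := by ring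
  have hlt : row + k * j < n := by omega
  have cast2 : ((row:Int) + (k:Int) * (j:Int)) = ((row + k * j : Nat) : Int) := by
    push_cast; ring
  have cast3 : ((row:Int) + (0 + (k:Int) * (j:Int))) = ((row + k * j : Nat) : Int) := by
    push_cast; ring
  simp only [Function.comp_apply]
  rw [cast2, cast3, Int.toNat_natCast, PySem.List.pyGetD_natCast]
  rw [List.getElem?_eq_getElem (by omega), List.getD_eq_getElem _ _ (by omega)]


-- Port A reduces to the normal form (unconditionally)
lemma pv_A_eq (tiles : List (List Int)) : columns_from_tiles tiles = pvBuild tiles := by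
  have hinit : (List.range tiles.length).foldl (fun cs _ => cs ++ [([] : List Int)]) []
      = List.replicate tiles.length [] := by
    rw [PySem.List.foldl_append_singleton_eq_map (f := fun _ => ([] : List Int))]
    simp [List.map_const']
  simp only [columns_from_tiles, pvISqrt_eq_sqrt, hinit, PySem.List.pyRange_zero_natCast, List.foldl_map,
    pv_foldl_set_extend, pv_inner_pair]
  rw [(pv_outer_fold _ (Nat.sqrt tiles.length) (Nat.sqrt tiles.length) 0
      (List.replicate tiles.length []) (fun i _ => pv_getD_replicate _ i)).1]
  simp only [pvBuild, pvColVal, pv_column_eq, Nat.zero_add]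

-- Port B reduces to the normal form on Pre_
lemma pv_B_eq (tiles : List (List Int)) (hn : tiles ≠ [])
    (hmod : tiles.length % Nat.sqrt tiles.length = 0) :
    columns_from_tiles_alt tiles = pvBuild tiles := by
  simp only [columns_from_tiles_alt, pvISqrt_eq_sqrt, pvBuild]
  apply PySem.List.foldl_congr_mem
  intro cols row hrow
  rw [pv_band_eq tiles row (List.length_pos_of_ne_nil hn) (List.mem_range.mp hrow) hmod]
  simp only [List.flatMap_map, pvColVal]

-- ===== VERDICT (by name: the statement is the Claim_ definition above) =====
theorem columns_from_tiles_spec : Claim_equal_columns_from_tiles := by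
  intro tiles _ hpre
  unfold Spec_columns_from_tiles
  by_cases hnil : tiles = []
  · subst hnil; rfl
  · rcases hpre with h | ⟨hmod, _⟩
    · exact absurd h hnil
    · rw [pvISqrt_eq_sqrt] at hmod
      rw [pv_A_eq, pv_B_eq tiles hnil hmod]
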